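-- pv_equiv track=rewrite | github.com/expertinpyo/algorithm | 0222/ypd02363/4613_러시아국기같은깃발/s1.py | russia
-- ===== SOURCE A (Python) =====
-- def russia(arr, n, m):
--     cnt_w = 0                       # w로 바꿔야 하는 개수
--     ans = n * m                     # 초기 최솟값 = 전체 개수
--     for i in range(n-2):            # n-2 까지
--         cnt_w += m - arr[i].count("W")
--         cnt_b = 0                   # b로 바꿔야 하는 개수
--         for j in range(i+1, n-1):   # w가 i 번 째 까지이므로 i + 1 부터
--             cnt_b += m - arr[j].count("B")
--             cnt_r = 0               # r로 바꿔야 하는 개수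
--             for k in range(j+1, n): # b가 j 번째 까지 이므로 j + 1 부터
--                 cnt_r += m - arr[k].count("R")
--             cnt = cnt_w + cnt_b + cnt_r
--             if cnt < ans:
--                 ans = cnt
--     return ans
-- ===== SOURCE B (Python) =====
-- def russia(arr, n, m):
--     ans = n * m
--     if n >= 3:
--         rows = arr[:n]
--         PW = [0]
--         PB = [0]
--         SR = [0]
--         for row in rows:
--             PW.append(PW[-1] + m - row.count("W"))
--         for row in rows:
--             PB.append(PB[-1] + m - row.count("B"))
--         for row in reversed(rows):
--             SR.append(SR[-1] + m - row.count("R"))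
--         SR.reverse()
--         for i in range(n - 2):
--             for j in range(i + 1, n - 1):
--                 cnt = PW[i + 1] + PB[j + 1] - PB[i + 1] + SR[j + 1]
--                 if cnt < ans:
--                     ans = cnt
--     return ans
-- ===== Notes on version B (the rewrite author's own statement) =====
-- stated objective: faster
-- what changed: B precomputes per-row stripe costs once into prefix-sum tables (PW, PB) and a suffix-sum table (SR), so the two boundary loops do O(1) lookups instead of re-counting characters and re-scanning the R-suffix for every boundary pair.
import Mathlib
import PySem

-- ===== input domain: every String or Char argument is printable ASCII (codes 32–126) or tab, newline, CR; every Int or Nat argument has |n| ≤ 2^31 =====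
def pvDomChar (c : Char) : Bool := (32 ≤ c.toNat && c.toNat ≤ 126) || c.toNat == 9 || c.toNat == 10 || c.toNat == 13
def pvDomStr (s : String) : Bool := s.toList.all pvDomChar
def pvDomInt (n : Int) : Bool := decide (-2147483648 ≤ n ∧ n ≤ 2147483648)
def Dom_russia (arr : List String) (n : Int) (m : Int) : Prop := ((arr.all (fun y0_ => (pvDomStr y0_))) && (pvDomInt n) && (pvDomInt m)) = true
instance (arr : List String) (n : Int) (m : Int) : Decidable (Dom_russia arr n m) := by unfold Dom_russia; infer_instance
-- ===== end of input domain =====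

-- B replaces A's per-boundary-pair re-counting and inner R-scan by cost tables built once (prefix sums PW/PB, suffix sums SR); same return value on Pre_.

-- ===== PORT A =====
def russia (arr : List String) (n : Int) (m : Int) : Int :=
  ((PySem.List.pyRange 0 (n - 2) 1).foldl (fun (st : Int × Int) i =>
    let cnt_w := st.1 + (m - (PySem.Str.count (PySem.List.pyGetD arr i "") "W" : Int))
    let inner := (PySem.List.pyRange (i + 1) (n - 1) 1).foldl (fun (st2 : Int × Int) j =>
      let cnt_b := st2.1 + (m - (PySem.Str.count (PySem.List.pyGetD arr j "") "B" : Int))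
      let cnt_r := (PySem.List.pyRange (j + 1) n 1).foldl (fun acc k =>
        acc + (m - (PySem.Str.count (PySem.List.pyGetD arr k "") "R" : Int))) 0
      let cnt := cnt_w + cnt_b + cnt_r
      (cnt_b, if cnt < st2.2 then cnt else st2.2)) (0, st.2)
    (cnt_w, inner.2)) (0, n * m)).2

-- ===== PORT B =====
-- costScan m c rs  is the Python loop  "P = [0]; for row in rs: P.append(P[-1] + m - row.count(c))"
def costScan (m : Int) (c : String) (rs : List String) : List Int :=
  rs.foldl (fun l row => l ++ [PySem.List.pyGetD l (-1) 0 + m - (PySem.Str.count row c : Int)]) [0]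

def russia_alt (arr : List String) (n : Int) (m : Int) : Int :=
  let ans := n * m
  if 3 ≤ n then
    let rows := PySem.List.slice arr none (some n)
    let PW := costScan m "W" rows
    let PB := costScan m "B" rows
    let SR := (costScan m "R" rows.reverse).reverse
    (PySem.List.pyRange 0 (n - 2) 1).foldl (fun ans i =>
      (PySem.List.pyRange (i + 1) (n - 1) 1).foldl (fun ans j =>
        let cnt := PySem.List.pyGetD PW (i + 1) 0 + PySem.List.pyGetD PB (j + 1) 0
          - PySem.List.pyGetD PB (i + 1) 0 + PySem.List.pyGetD SR (j + 1) 0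
        if cnt < ans then cnt else ans) ans) ans
  else ans

-- ===== PRECONDITION & SPEC =====
-- Pre_ excludes exactly the inputs on which A raises IndexError: n ≥ 3 with fewer than n rows.
def Pre_russia (arr : List String) (n : Int) (m : Int) : Prop := 3 ≤ n → n ≤ (arr.length : Int)
instance (arr : List String) (n : Int) (m : Int) : Decidable (Pre_russia arr n m) := by unfold Pre_russia; infer_instance
def pvWitness_russia : List String × Int × Int := (["WWB", "BWR", "RRR"], 3, 3)

def Spec_russia (arr : List String) (n : Int) (m : Int) (out : Int) : Prop := out = russia_alt arr n m
instance (arr : List String) (n : Int) (m : Int) (out : Int) : Decidable (Spec_russia arr n m out) := by unfold Spec_russia; infer_instance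

-- ===== CLAIM (what is proved, stated in full; the proofs are below) =====
def Claim_equal_russia : Prop := ∀ (arr : List String) (n : Int) (m : Int), Dom_russia arr n m → Pre_russia arr n m → Spec_russia arr n m (russia arr n m)

-- ===== LEMMAS AND PROOFS =====

-- prefix cost sum: total cost of the first x rows of rs under character c
def pcost (m : Int) (c : String) (rs : List String) (x : ℕ) : Int :=
  ((rs.take x).map (fun row => m - (PySem.Str.count row c : Int))).sum

theorem pcost_zero (m : Int) (c : String) (rs : List String) : pcost m c rs 0 = 0 := by
  simp [pcost]

theorem pcost_cons (m : Int) (c : String) (r : String) (rs : List String) (x : ℕ) :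
    pcost m c (r :: rs) (x + 1) = (m - (PySem.Str.count r c : Int)) + pcost m c rs x := by
  simp [pcost, List.take_succ_cons]

theorem pcost_succ (m : Int) (c : String) (rs : List String) (x : ℕ) (hx : x < rs.length) :
    pcost m c rs (x + 1) = pcost m c rs x + (m - (PySem.Str.count (rs.getD x "") c : Int)) := by
  have hsplit : rs.take (x + 1) = rs.take x ++ [rs[x]] := by
    rw [List.take_add_one, List.getElem?_eq_getElem hx]
    rfl
  unfold pcost
  rw [hsplit, List.map_append, List.sum_append, List.getD_eq_getElem _ _ hx]
  simp

theorem takeGetD (arr : List String) (N a : ℕ) (ha : a < N) :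
    (arr.take N).getD a "" = arr.getD a "" := by
  simp [List.getD_eq_getElem?_getD, ha]

theorem if_min_congr {a b ans : Int} (h : a = b) :
    (if a < ans then a else ans) = (if b < ans then b else ans) := by rw [h]

theorem foldl_init_congr {α β : Type} (f : α → β → α) (l : List β) {a b : α} (h : a = b) :
    l.foldl f a = l.foldl f b := by rw [h]

theorem costScan_go (m : Int) (c : String) :
    ∀ (rs : List String) (l0 : List Int), l0 ≠ [] →
      rs.foldl (fun l row => l ++ [PySem.List.pyGetD l (-1) 0 + m - (PySem.Str.count row c : Int)]) l0
      = l0 ++ (List.range rs.length).map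
          (fun x => PySem.List.pyGetD l0 (-1) 0 + pcost m c rs (x + 1)) := by
  intro rs
  induction rs with
  | nil => intro l0 _; simp
  | cons r t ih =>
    intro l0 h0
    rw [List.foldl_cons,
        ih (l0 ++ [PySem.List.pyGetD l0 (-1) 0 + m - (PySem.Str.count r c : Int)]) (by simp),
        PySem.List.pyGetD_neg_one_append_singleton,
        List.append_assoc, List.singleton_append,
        List.length_cons, List.range_succ_eq_map, List.map_cons, List.map_map]
    congr 1
    congr 1
    · show _ = _ + pcost m c (r :: t) (0 + 1)
      rw [pcost_cons, pcost_zero]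
      ring
    · apply List.map_congr_left
      intro a _
      simp only [Function.comp_apply, Nat.succ_eq_add_one]
      rw [pcost_cons]
      ring

theorem costScan_getD (m : Int) (c : String) (rs : List String) (x : ℕ) (hx : x ≤ rs.length) :
    (costScan m c rs).getD x 0 = pcost m c rs x := by
  unfold costScan
  rw [costScan_go m c rs [0] (by simp)]
  have h0 : PySem.List.pyGetD ([0] : List Int) (-1) 0 = (0 : Int) := by decide
  rw [h0, List.singleton_append]
  cases x with
  | zero => simp [pcost]
  | succ y =>
    have hy : y < rs.length := by omega
    rw [List.getD_eq_getElem?_getD, List.getElem?_cons_succ, List.getElem?_map,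
        List.getElem?_range hy]
    simp

theorem pcost_reverse (m : Int) (c : String) (rs : List String) (x : ℕ) (hx : x ≤ rs.length) :
    pcost m c rs.reverse (rs.length - x) = pcost m c rs rs.length - pcost m c rs x := by
  unfold pcost
  rw [List.take_reverse, show rs.length - (rs.length - x) = x from by omega,
      List.map_reverse, List.sum_reverse, List.take_of_length_le (le_refl rs.length)]
  have hsplit : ((rs.take x).map (fun row => m - (PySem.Str.count row c : Int))).sum
      + ((rs.drop x).map (fun row => m - (PySem.Str.count row c : Int))).sum
      = (rs.map (fun row => m - (PySem.Str.count row c : Int))).sum := by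
    rw [← List.sum_append, ← List.map_append, List.take_append_drop]
  linarith [hsplit]

theorem srScan_getD (m : Int) (c : String) (rs : List String) (x : ℕ) (hx : x ≤ rs.length) :
    ((costScan m c rs.reverse).reverse).getD x 0
      = pcost m c rs rs.length - pcost m c rs x := by
  have hlen : (costScan m c rs.reverse).length = rs.length + 1 := by
    unfold costScan
    rw [costScan_go m c rs.reverse [0] (by simp)]
    simp
  have hx2 : x < (costScan m c rs.reverse).reverse.length := by
    rw [List.length_reverse, hlen]; omega
  rw [List.getD_eq_getElem _ _ hx2, List.getElem_reverse]
  have hx3 : (costScan m c rs.reverse).length - 1 - x < (costScan m c rs.reverse).length := by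
    omega
  rw [← List.getD_eq_getElem _ 0 hx3,
      show (costScan m c rs.reverse).length - 1 - x = rs.length - x from by omega,
      costScan_getD m c rs.reverse (rs.length - x) (by rw [List.length_reverse]; omega)]
  exact pcost_reverse m c rs x hx

theorem tableLookup (m : Int) (c : String) (rs : List String) (x : ℕ) (hx : x ≤ rs.length) :
    PySem.List.pyGetD (costScan m c rs) ((x : ℕ) : Int) 0 = pcost m c rs x := by
  rw [PySem.List.pyGetD_natCast]
  exact costScan_getD m c rs x hx

theorem tableLookupR (m : Int) (c : String) (rs : List String) (x : ℕ) (hx : x ≤ rs.length) :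
    PySem.List.pyGetD ((costScan m c rs.reverse).reverse) ((x : ℕ) : Int) 0
      = pcost m c rs rs.length - pcost m c rs x := by
  rw [PySem.List.pyGetD_natCast]
  exact srScan_getD m c rs x hx

theorem innerR (arr : List String) (n m : Int) (N : ℕ) (hn : n = (N : Int))
    (hlen : N ≤ arr.length) :
    ∀ (d : ℕ) (a : ℕ), a + d = N → ∀ (cacc : Int),
      (PySem.List.pyRange ((a : ℕ) : Int) n 1).foldl
        (fun acc k => acc + (m - (PySem.Str.count (PySem.List.pyGetD arr k "") "R" : Int))) cacc
      = cacc + (pcost m "R" (arr.take N) N - pcost m "R" (arr.take N) a) := by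
  intro d
  induction d with
  | zero =>
    intro a ha cacc
    have haN : a = N := by omega
    subst haN
    rw [PySem.List.pyRange_one_eq_nil (by omega)]
    simp
  | succ d ih =>
    intro a ha cacc
    rw [PySem.List.pyRange_one_cons (by omega : ((a : ℕ) : Int) < n), List.foldl_cons,
        show ((a : ℕ) : Int) + 1 = (((a + 1 : ℕ)) : Int) from by push_cast; ring,
        ih (a + 1) (by omega),
        PySem.List.pyGetD_natCast,
        pcost_succ m "R" (arr.take N) a (by rw [List.length_take]; omega),
        takeGetD arr N a (by omega)]
    ring

theorem middleLoop (arr : List String) (n m : Int) (N : ℕ) (hn : n = (N : Int))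
    (hlen : N ≤ arr.length) (i : ℕ) (cw : Int)
    (hcw : cw = pcost m "W" (arr.take N) (i + 1)) :
    ∀ (d : ℕ) (bI : Int) (b : ℕ), bI = ((b : ℕ) : Int) → b + d + 1 = N → ∀ (ans cb : Int),
      cb = pcost m "B" (arr.take N) b - pcost m "B" (arr.take N) (i + 1) →
      ((PySem.List.pyRange bI (n - 1) 1).foldl (fun (st2 : Int × Int) j =>
          let cnt_b := st2.1 + (m - (PySem.Str.count (PySem.List.pyGetD arr j "") "B" : Int))
          let cnt_r := (PySem.List.pyRange (j + 1) n 1).foldl (fun acc k =>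
            acc + (m - (PySem.Str.count (PySem.List.pyGetD arr k "") "R" : Int))) 0
          let cnt := cw + cnt_b + cnt_r
          (cnt_b, if cnt < st2.2 then cnt else st2.2)) (cb, ans)).2
      = (PySem.List.pyRange bI (n - 1) 1).foldl (fun ans j =>
          let cnt := pcost m "W" (arr.take N) (i + 1)
            + pcost m "B" (arr.take N) (j.toNat + 1)
            - pcost m "B" (arr.take N) (i + 1)
            + (pcost m "R" (arr.take N) N - pcost m "R" (arr.take N) (j.toNat + 1))
          if cnt < ans then cnt else ans) ans := by
  intro d
  induction d with
  | zero =>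
    intro bI b hbI hb ans cb hcb
    subst hbI
    rw [PySem.List.pyRange_one_eq_nil (by omega)]
    rfl
  | succ d ih =>
    intro bI b hbI hb ans cb hcb
    subst hbI
    rw [PySem.List.pyRange_one_cons (by omega : ((b : ℕ) : Int) < n - 1), List.foldl_cons,
        show ((b : ℕ) : Int) + 1 = (((b + 1 : ℕ)) : Int) from by push_cast; ring]
    refine Eq.trans (ih _ (b + 1) rfl (by omega) _ _ ?hcb2) ?rest
    case hcb2 =>
      rw [hcb, PySem.List.pyGetD_natCast,
          pcost_succ m "B" (arr.take N) b (by rw [List.length_take]; omega),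
          takeGetD arr N b (by omega)]
      ring
    case rest =>
      refine foldl_init_congr _ _ ?_
      apply if_min_congr
      rw [innerR arr n m N hn hlen (N - (b + 1)) (b + 1) (by omega),
          PySem.List.pyGetD_natCast, hcb, hcw,
          show (((b : ℕ) : Int)).toNat = b from by omega,
          pcost_succ m "B" (arr.take N) b (by rw [List.length_take]; omega),
          takeGetD arr N b (by omega)]
      ring

theorem outerLoop (arr : List String) (n m : Int) (N : ℕ) (hn : n = (N : Int))
    (hlen : N ≤ arr.length) :
    ∀ (d : ℕ) (kI : Int) (k : ℕ), kI = ((k : ℕ) : Int) → k + d + 2 = N → ∀ (ans cw : Int),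
      cw = pcost m "W" (arr.take N) k →
      ((PySem.List.pyRange kI (n - 2) 1).foldl (fun (st : Int × Int) i =>
          let cnt_w := st.1 + (m - (PySem.Str.count (PySem.List.pyGetD arr i "") "W" : Int))
          let inner := (PySem.List.pyRange (i + 1) (n - 1) 1).foldl (fun (st2 : Int × Int) j =>
            let cnt_b := st2.1 + (m - (PySem.Str.count (PySem.List.pyGetD arr j "") "B" : Int))
            let cnt_r := (PySem.List.pyRange (j + 1) n 1).foldl (fun acc k =>
              acc + (m - (PySem.Str.count (PySem.List.pyGetD arr k "") "R" : Int))) 0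
            let cnt := cnt_w + cnt_b + cnt_r
            (cnt_b, if cnt < st2.2 then cnt else st2.2)) (0, st.2)
          (cnt_w, inner.2)) (cw, ans)).2
      = (PySem.List.pyRange kI (n - 2) 1).foldl (fun ans i =>
          (PySem.List.pyRange (i + 1) (n - 1) 1).foldl (fun ans j =>
            let cnt := pcost m "W" (arr.take N) (i.toNat + 1)
              + pcost m "B" (arr.take N) (j.toNat + 1)
              - pcost m "B" (arr.take N) (i.toNat + 1)
              + (pcost m "R" (arr.take N) N - pcost m "R" (arr.take N) (j.toNat + 1))
            if cnt < ans then cnt else ans) ans) ans := by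
  intro d
  induction d with
  | zero =>
    intro kI k hkI hk ans cw hcw
    subst hkI
    rw [PySem.List.pyRange_one_eq_nil (by omega)]
    rfl
  | succ d ih =>
    intro kI k hkI hk ans cw hcw
    subst hkI
    rw [PySem.List.pyRange_one_cons (by omega : ((k : ℕ) : Int) < n - 2), List.foldl_cons,
        show ((k : ℕ) : Int) + 1 = (((k + 1 : ℕ)) : Int) from by push_cast; ring]
    refine Eq.trans (ih _ (k + 1) rfl (by omega) _ _ ?hcw2) ?rest
    case hcw2 =>
      rw [hcw, PySem.List.pyGetD_natCast,
          pcost_succ m "W" (arr.take N) k (by rw [List.length_take]; omega),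
          takeGetD arr N k (by omega)]
    case rest =>
      refine foldl_init_congr _ _ ?_
      refine middleLoop arr n m N hn hlen k _ ?hcwl (N - (k + 2)) _ (k + 1) rfl (by omega) ans 0 ?hcb0
      case hcwl =>
        rw [hcw, PySem.List.pyGetD_natCast,
            pcost_succ m "W" (arr.take N) k (by rw [List.length_take]; omega),
            takeGetD arr N k (by omega)]
      case hcb0 => rw [sub_self]

-- ===== VERDICT (by name: the statement is the Claim_ definition above) =====
theorem russia_spec : Claim_equal_russia := by
  unfold Claim_equal_russia
  intro arr n m _ hpre
  unfold Pre_russia at hpre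
  unfold Spec_russia
  by_cases hn3 : 3 ≤ n
  · have hlen' : n ≤ (arr.length : Int) := hpre hn3
    simp only [russia, russia_alt]
    rw [if_pos hn3, PySem.List.slice_to arr (show (0 : Int) ≤ n from by omega)]
    refine Eq.trans (outerLoop arr n m n.toNat (by omega) (by omega) (n.toNat - 2) 0 0
      (by simp) (by omega) (n * m) 0 (pcost_zero m "W" (arr.take n.toNat)).symm) ?_
    refine PySem.List.foldl_congr_mem _ _ _ _ ?_
    intro acc i hi
    obtain ⟨hi0, hi2⟩ := PySem.List.mem_pyRange_one.mp hi
    refine PySem.List.foldl_congr_mem _ _ _ _ ?_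
    intro acc2 j hj
    obtain ⟨hj1, hj2⟩ := PySem.List.mem_pyRange_one.mp hj
    apply if_min_congr
    rw [show i + 1 = ((i.toNat + 1 : ℕ) : Int) from by omega,
        show j + 1 = ((j.toNat + 1 : ℕ) : Int) from by omega,
        tableLookup m "W" (arr.take n.toNat) (i.toNat + 1) (by rw [List.length_take]; omega),
        tableLookup m "B" (arr.take n.toNat) (j.toNat + 1) (by rw [List.length_take]; omega),
        tableLookup m "B" (arr.take n.toNat) (i.toNat + 1) (by rw [List.length_take]; omega),
        tableLookupR m "R" (arr.take n.toNat) (j.toNat + 1) (by rw [List.length_take]; omega),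
        show (arr.take n.toNat).length = n.toNat from by rw [List.length_take]; omega]
  · simp only [russia, russia_alt]
    rw [if_neg hn3, PySem.List.pyRange_one_eq_nil (show n - 2 ≤ (0 : Int) from by omega)]
    rfl
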